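-- pv_equiv track=rewrite | github.com/ROBACON/mobspy | mobspy/plot_scripts/process_plot_data.py | time_filter_operation
-- ===== SOURCE A (Python) =====
-- def time_filter_operation(low, high, time_data, data):
--
--     new_time_data = []
--     new_data = []
--
--     for t, d in zip(time_data, data):
--         if t < low:
--             continue
--         elif low < t < high:
--             new_time_data.append(t)
--             new_data.append(d)
--         elif t > high:
--             break
--
--     return new_time_data, new_data
-- ===== SOURCE B (Python) =====
-- def time_filter_operation(low, high, time_data, data):
--     # Pair up, cut the prefix at the first time strictly above high (A breaks there),
--     # then keep the pairs strictly inside (low, high) and unzip.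
--     pairs = list(zip(time_data, data))
--     cut = len(pairs)
--     for i, (t, _) in enumerate(pairs):
--         if t > high:
--             cut = i
--             break
--     kept = [(t, d) for t, d in pairs[:cut] if low < t < high]
--     return [t for t, _ in kept], [d for _, d in kept]
-- ===== Notes on version B (the rewrite author's own statement) =====
-- stated objective: alternative
-- what changed: A interleaves skip/append/break logic in one stateful loop over two output lists; B first locates the break point (first time strictly above high), slices that prefix, filters it with one comprehension and unzips.
import Mathlib
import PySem

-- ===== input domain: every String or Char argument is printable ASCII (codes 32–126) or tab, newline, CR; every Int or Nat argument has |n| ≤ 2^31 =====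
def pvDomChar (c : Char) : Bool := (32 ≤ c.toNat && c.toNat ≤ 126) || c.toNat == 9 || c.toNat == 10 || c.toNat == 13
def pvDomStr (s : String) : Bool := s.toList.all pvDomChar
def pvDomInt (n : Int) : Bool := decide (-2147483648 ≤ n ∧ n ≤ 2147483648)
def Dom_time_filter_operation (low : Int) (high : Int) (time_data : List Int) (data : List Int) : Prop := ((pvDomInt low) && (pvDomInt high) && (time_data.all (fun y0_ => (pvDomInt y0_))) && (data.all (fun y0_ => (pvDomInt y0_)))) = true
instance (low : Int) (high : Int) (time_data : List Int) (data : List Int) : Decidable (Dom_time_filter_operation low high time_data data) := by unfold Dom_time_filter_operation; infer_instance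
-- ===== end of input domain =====

-- B restructures A's single skip/append/break loop as: find the break point, slice, filter, unzip.
-- Equivalence of return values is proved for all inputs (A is total).
-- ===== PORT A =====
-- the for-loop of A: accumulators are the two output lists; `break` returns them
def tfoLoopA (low : Int) (high : Int) : List (Int × Int) → List Int → List Int → List Int × List Int
  | [], nt, nd => (nt, nd)
  | (t, d) :: rest, nt, nd =>
    if t < low then tfoLoopA low high rest nt nd
    else if low < t ∧ t < high then tfoLoopA low high rest (nt ++ [t]) (nd ++ [d])
    else if t > high then (nt, nd)
    else tfoLoopA low high rest nt nd

def time_filter_operation (low : Int) (high : Int) (time_data : List Int) (data : List Int) : List Int × List Int :=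
  tfoLoopA low high (time_data.zip data) [] []

-- ===== PORT B =====
-- B's cut loop: index of the first pair with t > high, defaulting to the length
def tfoCutB (high : Int) : List (Int × Int) → Nat
  | [] => 0
  | (t, _) :: rest => if t > high then 0 else tfoCutB high rest + 1

def time_filter_operation_alt (low : Int) (high : Int) (time_data : List Int) (data : List Int) : List Int × List Int :=
  let pairs := time_data.zip data
  let kept := (pairs.take (tfoCutB high pairs)).filter (fun td => decide (low < td.1 ∧ td.1 < high))
  (kept.map Prod.fst, kept.map Prod.snd)

-- ===== PRECONDITION & SPEC =====
def Spec_time_filter_operation (low : Int) (high : Int) (time_data : List Int) (data : List Int) (out : List Int × List Int) : Prop := out = time_filter_operation_alt low high time_data data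
instance (low : Int) (high : Int) (time_data : List Int) (data : List Int) (out : List Int × List Int) : Decidable (Spec_time_filter_operation low high time_data data out) := by unfold Spec_time_filter_operation; infer_instance

-- ===== CLAIM (what is proved, stated in full; the proofs are below) =====
def Claim_equal_time_filter_operation : Prop := ∀ (low : Int) (high : Int) (time_data : List Int) (data : List Int), Dom_time_filter_operation low high time_data data → Spec_time_filter_operation low high time_data data (time_filter_operation low high time_data data)

-- ===== LEMMAS AND PROOFS =====
-- degenerate case high ≤ low: A never appends
theorem tfoLoopA_deg (low high : Int) (h : high ≤ low) (ps : List (Int × Int)) (nt nd : List Int) :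
    tfoLoopA low high ps nt nd = (nt, nd) := by
  induction ps generalizing nt nd with
  | nil => simp [tfoLoopA]
  | cons hd tl ih =>
    obtain ⟨t, d⟩ := hd
    simp only [tfoLoopA]
    split_ifs with h1 h2 h3
    · exact ih nt nd
    · exact absurd (lt_trans h2.1 h2.2) (not_lt.mpr h)
    · rfl
    · exact ih nt nd

-- main case low < high: A's loop = B's take-filter, modulo the accumulators
theorem tfoLoopA_main (low high : Int) (h : low < high) (ps : List (Int × Int)) (nt nd : List Int) :
    tfoLoopA low high ps nt nd =
      (nt ++ ((ps.take (tfoCutB high ps)).filter (fun td => decide (low < td.1 ∧ td.1 < high))).map Prod.fst,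
       nd ++ ((ps.take (tfoCutB high ps)).filter (fun td => decide (low < td.1 ∧ td.1 < high))).map Prod.snd) := by
  induction ps generalizing nt nd with
  | nil => simp [tfoLoopA, tfoCutB]
  | cons hd tl ih =>
    obtain ⟨t, d⟩ := hd
    by_cases hth : t > high
    · have h1 : ¬ t < low := not_lt.mpr (le_of_lt (lt_trans h hth))
      have h2 : ¬ (low < t ∧ t < high) := fun hc => absurd hth (not_lt.mpr (le_of_lt hc.2))
      simp [tfoLoopA, tfoCutB, h1, h2, hth]
    · simp only [tfoCutB, if_neg hth, List.take_succ_cons, List.filter_cons]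
      by_cases h1 : t < low
      · have hp : ¬ (low < t ∧ t < high) := fun hc => absurd h1 (not_lt.mpr (le_of_lt hc.1))
        simp only [tfoLoopA, if_pos h1]
        rw [ih]
        simp [hp]
      · by_cases h2 : low < t ∧ t < high
        · simp only [tfoLoopA, if_neg h1, if_pos h2]
          rw [ih]
          simp [h2.1, h2.2]
        · simp only [tfoLoopA, if_neg h1, if_neg h2, if_neg hth]
          rw [ih]
          simp [h2]

-- ===== VERDICT (by name: the statement is the Claim_ definition above) =====
theorem time_filter_operation_spec : Claim_equal_time_filter_operation := by
  intro low high time_data data _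
  unfold Spec_time_filter_operation time_filter_operation time_filter_operation_alt
  by_cases h : low < high
  · simpa using tfoLoopA_main low high h (time_data.zip data) [] []
  · rw [tfoLoopA_deg low high (not_lt.mp h) (time_data.zip data) [] []]
    have hfil : ((time_data.zip data).take (tfoCutB high (time_data.zip data))).filter
        (fun td => decide (low < td.1 ∧ td.1 < high)) = [] := by
      rw [List.filter_eq_nil_iff]
      intro td _
      simp only [decide_eq_true_eq, not_and, not_lt]
      exact fun h1 => le_of_lt (lt_of_le_of_lt (not_lt.mp h) h1)
    dsimp only
    rw [hfil]
    simp
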